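-- pv_equiv track=rewrite | github.com/getsentry/sentry-kafka-management | sentry_kafka_management/actions/topics/placement.py | build_slices
-- ===== SOURCE A (Python) =====
-- from collections import defaultdict
--
-- Slice = list[int]  # list of broker IDs (one per zone)
--
-- def build_slices(broker_id_mapping: dict[str, int]) -> list[Slice]:
--     """
--     Given a mapping of broker endpoints to broker IDs, build a list of slices,
--     where each slice is a list of broker IDs (one per zone).
--     """
--     slices: list[Slice] = []
--     by_zone: dict[str, list[int]] = defaultdict(list)
--
--     for broker_str, broker_id in broker_id_mapping.items():
--         try:
--             zone = broker_str.split(":")[0].split(".")[1]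
--         except IndexError:
--             raise ValueError(f"Invalid broker endpoint: {broker_str}")
--         by_zone[zone].append(broker_id)
--
--     zones = sorted(by_zone.keys())
--     for zone in zones:
--         by_zone[zone].sort()
--
--     # all zones should have the same number of brokers
--     if not all(len(by_zone[z]) == len(by_zone[zones[0]]) for z in zones):
--         raise ValueError("All zones must have the same number of brokers")
--
--     num_slices = len(by_zone[zones[0]])
--
--     for slice_index in range(num_slices):
--         slices.append([by_zone[z][slice_index] for z in zones])
--
--     return slices
-- ===== SOURCE B (Python) =====
-- Slice = list[int]
--
-- def build_slices(broker_id_mapping: dict[str, int]) -> list[Slice]: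
--     """
--     One global sort of (zone, broker_id) pairs replaces the dict-of-lists
--     grouping plus per-zone sorts; consecutive runs of equal zones are the
--     columns, and the slices are their transpose.
--     """
--     pairs = []
--     for broker_str, broker_id in broker_id_mapping.items():
--         parts = broker_str.split(":")[0].split(".")
--         if len(parts) < 2:
--             raise ValueError(f"Invalid broker endpoint: {broker_str}")
--         pairs.append((parts[1], broker_id))
--     pairs.sort()
--
--     cols = []
--     rest = pairs
--     while rest:
--         zone = rest[0][0]
--         i = 1
--         while i < len(rest) and rest[i][0] == zone:
--             i += 1
--         cols.append([bid for _, bid in rest[:i]])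
--         rest = rest[i:]
--
--     num_slices = len(cols[0])  # IndexError on an empty mapping, as in A
--     if any(len(c) != num_slices for c in cols):
--         raise ValueError("All zones must have the same number of brokers")
--
--     return [list(s) for s in zip(*cols)]
-- ===== Notes on version B (the rewrite author's own statement) =====
-- stated objective: alternative
-- what changed: Replaces A's dict-of-lists grouping with per-zone in-place sorts and an index-based slice loop by one global lexicographic sort of (zone, id) pairs, grouping consecutive equal-zone runs into columns and transposing them with zip.
-- outside the precondition, e.g. on build_slices({}): A raises IndexError, B raises IndexError
import Mathlib
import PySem

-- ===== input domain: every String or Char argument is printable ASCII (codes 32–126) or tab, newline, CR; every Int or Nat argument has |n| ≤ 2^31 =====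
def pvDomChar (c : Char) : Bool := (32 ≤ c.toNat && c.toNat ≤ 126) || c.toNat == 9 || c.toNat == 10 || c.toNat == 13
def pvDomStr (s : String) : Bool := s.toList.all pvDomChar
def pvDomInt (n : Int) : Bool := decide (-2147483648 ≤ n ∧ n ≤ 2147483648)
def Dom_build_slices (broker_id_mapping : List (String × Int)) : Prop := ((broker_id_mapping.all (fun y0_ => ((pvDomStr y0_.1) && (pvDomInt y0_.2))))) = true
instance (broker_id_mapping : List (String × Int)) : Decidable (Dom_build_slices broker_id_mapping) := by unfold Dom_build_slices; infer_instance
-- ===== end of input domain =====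

-- B replaces A's dict grouping + per-zone sorts + index loop by one global sort of
-- (zone, id) pairs, consecutive-run grouping and a zip transpose (objective: alternative,
-- same asymptotic cost). Equality of RETURN values is claimed on Pre_ (where A returns).

-- shared parsing helper: broker_str.split(":")[0].split(".") and its element [1]
def pvParts (s : String) : List String :=
  (PySem.Str.split? (PySem.List.pyGetD ((PySem.Str.split? s ":").getD []) 0 "") ".").getD []

def pvZone (s : String) : String := PySem.List.pyGetD (pvParts s) 1 ""

-- ===== PORT A =====
-- A's `if not all(...)` check only raises ValueError (excluded by Pre_), so it computes no value here.
def build_slices (broker_id_mapping : List (String × Int)) : List (List Int) :=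
  let by_zone : PySem.Dict String (List Int) :=
    broker_id_mapping.foldl
      (fun d p => d.modify (pvZone p.1) [] (fun l => l ++ [p.2])) PySem.Dict.empty
  let zones := PySem.List.sorted by_zone.keys (fun z => z)
  let by_zone2 := zones.foldl
      (fun d z => d.insert z (PySem.List.sorted (d.getD z []) (fun x => x))) by_zone
  let num_slices := (by_zone2.getD (PySem.List.pyGetD zones 0 "") []).length
  (PySem.List.pyRange 0 (num_slices : Int) 1).foldl
    (fun acc i => acc ++ [zones.map (fun z => PySem.List.pyGetD (by_zone2.getD z []) i 0)]) []

-- ===== PORT B =====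
-- consecutive-run grouping of the sorted pair list (B's while loop over `rest`)
def pvGroupCols : List (String × Int) → List (List Int)
  | [] => []
  | (z, b) :: rest =>
      (b :: (rest.takeWhile (fun p => p.1 == z)).map Prod.snd)
        :: pvGroupCols (rest.dropWhile (fun p => p.1 == z))
termination_by l => l.length
decreasing_by
  exact Nat.lt_succ_of_le (List.length_dropWhile_le _ _)

-- zip(*cols) as lists: rows up to the shortest column
def pvZipStar (cols : List (List Int)) : List (List Int) :=
  match cols with
  | [] => []
  | c :: cs =>
      let k := cs.foldl (fun mn l => min mn l.length) c.length
      (List.range k).map (fun i => cols.map (fun col => col.getD i 0))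

-- B's `any(...)` check only raises ValueError (excluded by Pre_), so it computes no value here.
def build_slices_alt (broker_id_mapping : List (String × Int)) : List (List Int) :=
  let pairs := broker_id_mapping.foldl (fun acc p => acc ++ [(pvZone p.1, p.2)]) []
  let spairs := PySem.List.sorted2 pairs Prod.fst Prod.snd
  let cols := pvGroupCols spairs
  pvZipStar cols

-- ===== PRECONDITION & SPEC =====
-- Pre_ excludes association lists with duplicate keys (not a valid Python dict encoding),
-- endpoints with no '.'-separated zone (A raises ValueError), the empty mapping (A raises
-- IndexError on zones[0]) and unequal per-zone broker counts (A raises ValueError).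
def Pre_build_slices (broker_id_mapping : List (String × Int)) : Prop :=
  (broker_id_mapping.map Prod.fst).Nodup ∧
  broker_id_mapping ≠ [] ∧
  (∀ p ∈ broker_id_mapping, 2 ≤ (pvParts p.1).length) ∧
  (∀ p ∈ broker_id_mapping, ∀ q ∈ broker_id_mapping,
     (broker_id_mapping.map (fun r => pvZone r.1)).count (pvZone p.1)
       = (broker_id_mapping.map (fun r => pvZone r.1)).count (pvZone q.1))
instance (broker_id_mapping : List (String × Int)) : Decidable (Pre_build_slices broker_id_mapping) := by
  unfold Pre_build_slices; infer_instance

def pvWitness_build_slices : (List (String × Int)) :=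
  [("h1.z1.example:9092", 5), ("h2.z2.example:9092", 3)]

def Spec_build_slices (broker_id_mapping : List (String × Int)) (out : List (List Int)) : Prop := out = build_slices_alt broker_id_mapping
instance (broker_id_mapping : List (String × Int)) (out : List (List Int)) : Decidable (Spec_build_slices broker_id_mapping out) := by unfold Spec_build_slices; infer_instance

-- ===== CLAIM (what is proved, stated in full; the proofs are below) =====
def Claim_equal_build_slices : Prop := ∀ (broker_id_mapping : List (String × Int)), Dom_build_slices broker_id_mapping → Pre_build_slices broker_id_mapping → Spec_build_slices broker_id_mapping (build_slices broker_id_mapping)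

-- ===== LEMMAS AND PROOFS =====

-- abbreviations for the proof
def pvPairs (m : List (String × Int)) : List (String × Int) := m.map (fun p => (pvZone p.1, p.2))
def pvCol (prs : List (String × Int)) (z : String) : List Int :=
  (prs.filter (fun p => p.1 == z)).map Prod.snd
def pvS (prs : List (String × Int)) (z : String) : List Int :=
  PySem.List.sorted (pvCol prs z) (fun x => x)
def pvZones (prs : List (String × Int)) : List String :=
  PySem.List.sorted (PySem.Set.ofList (prs.map Prod.fst)) (fun z => z)
def pvLexLe (p q : String × Int) : Prop := p.1 < q.1 ∨ (p.1 = q.1 ∧ p.2 ≤ q.2)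

-- A's grouping fold computes pvCol
lemma pv_byzone_getD (m : List (String × Int)) (z : String) :
    (m.foldl (fun d p => d.modify (pvZone p.1) [] (fun l => l ++ [p.2]))
      PySem.Dict.empty).getD z [] = pvCol (pvPairs m) z := by
  have h : m.foldl (fun d p => d.modify (pvZone p.1) [] (fun l => l ++ [p.2])) PySem.Dict.empty
      = (pvPairs m).foldl (fun d p => d.modify p.1 [] (fun l => l ++ [p.2])) PySem.Dict.empty := by
    simp [pvPairs, List.foldl_map]
  rw [h, PySem.Dict.getD_foldl_modify_append, PySem.Dict.getD_empty]
  rfl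

lemma pv_byzone_keys (m : List (String × Int)) :
    (m.foldl (fun d p => d.modify (pvZone p.1) [] (fun l => l ++ [p.2]))
      PySem.Dict.empty).keys = PySem.Set.ofList ((pvPairs m).map Prod.fst) := by
  rw [PySem.Dict.keys_foldl_modify_key m (fun p => pvZone p.1) [] (fun d p l => l ++ [p.2]),
    PySem.Dict.keys_empty]
  have h : (pvPairs m).map Prod.fst = m.map (fun p => pvZone p.1) := by
    simp [pvPairs]
  rw [h]
  rfl

-- the per-zone in-place sort loop
lemma pv_sortloop_getD (zs : List String) (hnd : zs.Nodup)
    (d : PySem.Dict String (List Int)) (z : String) :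
    (zs.foldl (fun d z => d.insert z (PySem.List.sorted (d.getD z []) (fun x => x))) d).getD z []
      = if z ∈ zs then PySem.List.sorted (d.getD z []) (fun x => x) else d.getD z [] := by
  induction zs generalizing d with
  | nil => simp
  | cons a t ih =>
      simp only [List.foldl_cons]
      rcases List.nodup_cons.mp hnd with ⟨ha, ht⟩
      rw [ih ht]
      by_cases hz : z = a
      · subst hz
        simp [ha]
      · simp [PySem.Dict.getD_insert, hz, List.mem_cons]

lemma pv_pairwise_insertBy {α : Type} (r : α → α → Prop) (before : α → α → Bool)
    (htrans : ∀ a b c, r a b → r b c → r a c)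
    (htb : ∀ a b, before a b = true → r a b)
    (hfb : ∀ a b, before a b = false → r b a)
    (x : α) (acc : List α) (h : acc.Pairwise r) :
    (PySem.List.insertBy before x acc).Pairwise r := by
  induction acc with
  | nil => simp [PySem.List.insertBy]
  | cons y ys ih =>
      rcases List.pairwise_cons.mp h with ⟨hy, hys⟩
      by_cases hb : before x y = true
      · simp only [PySem.List.insertBy, hb, if_true]
        refine List.pairwise_cons.mpr ⟨?_, h⟩
        intro z hz
        rcases List.mem_cons.mp hz with hz | hz
        · exact hz ▸ htb _ _ hb
        · exact htrans _ _ _ (htb _ _ hb) (hy z hz)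
      · simp only [PySem.List.insertBy, hb]
        refine List.pairwise_cons.mpr ⟨?_, ih hys⟩
        intro z hz
        rcases (PySem.List.mem_insertBy before x z ys).mp hz with hz | hz
        · exact hz ▸ hfb _ _ (by simpa using hb)
        · exact hy z hz

lemma pv_lexle_trans (a b c : String × Int) (h1 : pvLexLe a b) (h2 : pvLexLe b c) : pvLexLe a c := by
  rcases h1 with h1 | ⟨h1, h1'⟩ <;> rcases h2 with h2 | ⟨h2, h2'⟩ <;> unfold pvLexLe
  · exact Or.inl (h1.trans h2)
  · exact Or.inl (h2 ▸ h1)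
  · exact Or.inl (h1 ▸ h2)
  · exact Or.inr ⟨h1.trans h2, h1'.trans h2'⟩

def pvLt (a b : String × Int) : Bool :=
  decide (a.1 < b.1) || (!decide (b.1 < a.1) && decide (a.2 < b.2))

lemma pv_pvLt_true (a b : String × Int) (h : pvLt a b = true) : pvLexLe a b := by
  simp only [pvLt, Bool.or_eq_true, Bool.and_eq_true, Bool.not_eq_true', decide_eq_true_eq,
    decide_eq_false_iff_not, not_lt] at h
  rcases h with h | ⟨h1, h2⟩
  · exact Or.inl h
  · rcases lt_or_ge a.1 b.1 with h3 | h3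
    · exact Or.inl h3
    · exact Or.inr ⟨le_antisymm h1 h3, le_of_lt h2⟩

lemma pv_pvLt_false (a b : String × Int) (h : pvLt a b = false) : pvLexLe b a := by
  simp only [pvLt, Bool.or_eq_false_iff, Bool.and_eq_false_iff, Bool.not_eq_false',
    decide_eq_true_eq, decide_eq_false_iff_not, not_lt] at h
  rcases h with ⟨h1, h2 | h2⟩
  · exact Or.inl h2
  · rcases lt_or_ge b.1 a.1 with h3 | h3
    · exact Or.inl h3
    · exact Or.inr ⟨le_antisymm h1 h3, h2⟩

lemma pv_sorted2_eq_foldl (xs : List (String × Int)) :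
    PySem.List.sorted2 xs Prod.fst Prod.snd
      = xs.foldl (fun acc x => PySem.List.insertBy pvLt x acc) [] := rfl

lemma pv_sorted2_pairwise (xs : List (String × Int)) :
    (PySem.List.sorted2 xs Prod.fst Prod.snd).Pairwise pvLexLe := by
  rw [pv_sorted2_eq_foldl]
  generalize hacc : ([] : List (String × Int)) = acc
  have h : acc.Pairwise pvLexLe := by rw [← hacc]; simp
  clear hacc
  induction xs generalizing acc with
  | nil => simpa using h
  | cons x t ih =>
      simp only [List.foldl_cons]
      exact ih _ (pv_pairwise_insertBy pvLexLe pvLt pv_lexle_trans pv_pvLt_true pv_pvLt_false x acc h)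

def pvFlat (prs : List (String × Int)) : List (String × Int) :=
  (pvZones prs).flatMap (fun z => (pvS prs z).map (fun b => (z, b)))

lemma pv_zones_nodup (prs : List (String × Int)) : (pvZones prs).Nodup :=
  ((PySem.List.sorted_perm (PySem.Set.ofList (prs.map Prod.fst)) (fun z => z) false).nodup_iff).mpr
    (PySem.Set.nodup_ofList _)

lemma pv_mem_zones (prs : List (String × Int)) (z : String) :
    z ∈ pvZones prs ↔ z ∈ prs.map Prod.fst := by
  rw [pvZones, PySem.List.mem_sorted, PySem.Set.mem_ofList]

lemma pv_perm_flatMap_filter (ks : List String) (l : List (String × Int))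
    (hnd : ks.Nodup) (hcov : ∀ p ∈ l, p.1 ∈ ks) :
    (ks.flatMap (fun k => l.filter (fun p => p.1 == k))).Perm l := by
  induction ks generalizing l with
  | nil =>
      have : l = [] := List.eq_nil_iff_forall_not_mem.mpr (fun p hp => by simpa using hcov p hp)
      simp [this]
  | cons k t ih =>
      rcases List.nodup_cons.mp hnd with ⟨hk, ht⟩
      have hfl : ∀ k' ∈ t, l.filter (fun p => p.1 == k')
          = (l.filter (fun p => !(p.1 == k))).filter (fun p => p.1 == k') := by
        intro k' hk'
        rw [List.filter_filter]
        apply List.filter_congr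
        intro p _
        by_cases hp : p.1 = k'
        · have hkk : ¬ (k' = k) := fun h => hk (h ▸ hk')
          simp [hp, hkk]
        · simp [hp]
      have hstep : (t.flatMap (fun k' => l.filter (fun p => p.1 == k')))
          = t.flatMap (fun k' => (l.filter (fun p => !(p.1 == k))).filter (fun p => p.1 == k')) := by
        apply List.flatMap_congr  -- name guess
        exact hfl
      rw [List.flatMap_cons, hstep]
      have hrec := ih (l.filter (fun p => !(p.1 == k))) ht (by
        intro p hp
        rcases List.mem_filter.mp hp with ⟨hpl, hpk⟩
        have := hcov p hpl
        rcases List.mem_cons.mp this with h | h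
        · exact absurd (by simpa using h) (by simpa using hpk)
        · exact h)
      exact (List.Perm.append_left _ hrec).trans (List.filter_append_perm _ l)

lemma pv_group_perm_filter (prs : List (String × Int)) (z : String) :
    ((pvS prs z).map (fun b => (z, b))).Perm (prs.filter (fun p => p.1 == z)) := by
  have h1 : ((pvS prs z).map (fun b => (z, b))).Perm ((pvCol prs z).map (fun b => (z, b))) :=
    (PySem.List.sorted_perm _ _ _).map _
  have h2 : (pvCol prs z).map (fun b => (z, b)) = prs.filter (fun p => p.1 == z) := by
    rw [pvCol, List.map_map]
    have : ∀ p ∈ prs.filter (fun p => p.1 == z), ((fun b => (z, b)) ∘ Prod.snd) p = id p := by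
      intro p hp
      have := (List.mem_filter.mp hp).2
      have hz : p.1 = z := by simpa using this
      simp [← hz]
    rw [List.map_congr_left this, List.map_id]
  exact h2 ▸ h1

lemma pv_flat_perm (prs : List (String × Int)) : (pvFlat prs).Perm prs := by
  have h1 : (pvFlat prs).Perm ((pvZones prs).flatMap (fun z => prs.filter (fun p => p.1 == z))) :=
    List.Perm.flatMap (List.Perm.refl _) (fun z _ => pv_group_perm_filter prs z)
  exact h1.trans (pv_perm_flatMap_filter _ _ (pv_zones_nodup prs)
    (fun p hp => (pv_mem_zones prs p.1).mpr (List.mem_map_of_mem hp)))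

lemma pv_flat_pairwise (prs : List (String × Int)) : (pvFlat prs).Pairwise pvLexLe := by
  rw [pvFlat, List.pairwise_flatMap]
  constructor
  · intro z _
    refine List.Pairwise.map _ ?_ (PySem.List.sorted_pairwise (pvCol prs z) (fun x => x))
    intro a b hab
    exact Or.inr ⟨rfl, hab⟩
  · have hz : (pvZones prs).Pairwise (· < ·) := PySem.List.sorted_ofList_pairwise_lt _
    refine hz.imp ?_
    intro z₁ z₂ h x hx y hy
    rcases List.mem_map.mp hx with ⟨b₁, _, rfl⟩
    rcases List.mem_map.mp hy with ⟨b₂, _, rfl⟩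
    exact Or.inl h

lemma pv_lexle_antisymm (a b : String × Int) (h1 : pvLexLe a b) (h2 : pvLexLe b a) : a = b := by
  rcases h1 with h1 | ⟨h1, h1'⟩ <;> rcases h2 with h2 | ⟨h2, h2'⟩
  · exact absurd (h1.trans h2) (lt_irrefl _)
  · exact absurd h1 (h2 ▸ lt_irrefl _)
  · exact absurd h2 (h1 ▸ lt_irrefl _)
  · exact Prod.ext h1 (le_antisymm h1' h2')

lemma pv_sorted2_eq_flat (prs : List (String × Int)) :
    PySem.List.sorted2 prs Prod.fst Prod.snd = pvFlat prs := by
  exact ((PySem.List.sorted2_perm prs Prod.fst Prod.snd false).trans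
      (pv_flat_perm prs).symm).eq_of_pairwise
    (fun a b _ _ h1 h2 => pv_lexle_antisymm a b h1 h2)
    (pv_sorted2_pairwise prs) (pv_flat_pairwise prs)

lemma pv_takeWhile_false {α : Type} (p : α → Bool) (l : List α) (h : ∀ x ∈ l, p x = false) :
    l.takeWhile p = [] := by
  cases l with
  | nil => rfl
  | cons x t => simp [h x (List.mem_cons_self)]

lemma pv_dropWhile_false {α : Type} (p : α → Bool) (l : List α) (h : ∀ x ∈ l, p x = false) :
    l.dropWhile p = l := by
  cases l with
  | nil => rfl
  | cons x t => simp [h x (List.mem_cons_self)]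

lemma pv_groupCols_flatMap (ks : List String) (g : String → List Int)
    (hks : ks.Pairwise (· < ·)) (hne : ∀ k ∈ ks, g k ≠ []) :
    pvGroupCols (ks.flatMap (fun k => (g k).map (fun b => (k, b)))) = ks.map g := by
  induction ks with
  | nil => simp [pvGroupCols]
  | cons k t ih =>
      rcases List.pairwise_cons.mp hks with ⟨hkt, ht⟩
      obtain ⟨b, tl, hgb⟩ := List.exists_cons_of_ne_nil (hne k List.mem_cons_self)
      have hrest : ∀ x ∈ t.flatMap (fun k' => (g k').map (fun b => (k', b))),
          (x.1 == k) = false := by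
        intro x hx
        rcases List.mem_flatMap.mp hx with ⟨k', hk', hxk⟩
        rcases List.mem_map.mp hxk with ⟨b', _, rfl⟩
        simp only [beq_eq_false_iff_ne, ne_eq]
        exact ne_of_gt (hkt k' hk')
      have hsame : ∀ x ∈ tl.map (fun b => (k, b)), (x.1 == k) = true := by
        intro x hx
        rcases List.mem_map.mp hx with ⟨b', _, rfl⟩
        simp
      rw [List.flatMap_cons, hgb]
      simp only [List.map_cons, List.cons_append]
      rw [pvGroupCols]
      have htw : (tl.map (fun b => (k, b)) ++ t.flatMap (fun k' => (g k').map (fun b => (k', b)))).takeWhile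
            (fun p => p.1 == k) = tl.map (fun b => (k, b)) := by
        rw [List.takeWhile_append]
        rw [List.takeWhile_eq_self_iff.mpr hsame]
        simp [pv_takeWhile_false _ _ hrest]
      have hdw : (tl.map (fun b => (k, b)) ++ t.flatMap (fun k' => (g k').map (fun b => (k', b)))).dropWhile
            (fun p => p.1 == k) = t.flatMap (fun k' => (g k').map (fun b => (k', b))) := by
        rw [List.dropWhile_append]
        have h1 : (tl.map (fun b => (k, b))).dropWhile (fun p => p.1 == k) = [] := by
          rw [List.dropWhile_eq_nil_iff]
          intro x hx
          simp [hsame x hx]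
        rw [h1]
        simp [pv_dropWhile_false _ _ hrest]
      rw [htw, hdw, ih ht (fun k' hk' => hne k' (List.mem_cons_of_mem _ hk'))]
      simp [hgb, List.map_map]

def pvOut (m : List (String × Int)) : List (List Int) :=
  (List.range (pvS (pvPairs m) ((pvZones (pvPairs m)).headI)).length).map
    (fun i => (pvZones (pvPairs m)).map (fun z => (pvS (pvPairs m) z).getD i 0))

lemma pv_zones_ne_nil (m : List (String × Int)) (hne : m ≠ []) : pvZones (pvPairs m) ≠ [] := by
  intro h
  rw [pvZones, PySem.List.sorted_eq_nil_iff] at h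
  cases m with
  | nil => exact hne rfl
  | cons p t =>
      have hm : pvZone p.1 ∈ PySem.Set.ofList ((pvPairs (p :: t)).map Prod.fst) :=
        (PySem.Set.mem_ofList _ _).mpr (by simp [pvPairs])
      rw [h] at hm
      exact List.not_mem_nil hm

lemma pv_A_main (m : List (String × Int)) (hne : m ≠ []) : build_slices m = pvOut m := by
  obtain ⟨z₀, zt, hz⟩ := List.exists_cons_of_ne_nil (pv_zones_ne_nil m hne)
  unfold build_slices
  simp only []
  rw [pv_byzone_keys]
  have hzones : PySem.List.sorted (PySem.Set.ofList ((pvPairs m).map Prod.fst)) (fun z => z)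
      = pvZones (pvPairs m) := rfl
  rw [hzones, hz]
  have hnd : (z₀ :: zt).Nodup := hz ▸ pv_zones_nodup (pvPairs m)
  have hget : ∀ z ∈ (z₀ :: zt),
      ((z₀ :: zt).foldl (fun d z => d.insert z (PySem.List.sorted (d.getD z []) (fun x => x)))
        (m.foldl (fun d p => d.modify (pvZone p.1) [] (fun l => l ++ [p.2])) PySem.Dict.empty)).getD z []
      = pvS (pvPairs m) z := by
    intro z hzm
    rw [pv_sortloop_getD _ hnd _ z, if_pos hzm, pv_byzone_getD]
    rfl
  have hz0 : PySem.List.pyGetD (z₀ :: zt) 0 "" = z₀ := by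
    exact PySem.List.pyGetD_zero_cons z₀ zt ""
  rw [hz0]
  rw [hget z₀ List.mem_cons_self]
  rw [PySem.List.foldl_append_singleton_eq_map, List.nil_append]
  rw [PySem.List.pyRange_zero_natCast, List.map_map]
  rw [pvOut]
  have hhead : (pvZones (pvPairs m)).headI = z₀ := by rw [hz]; rfl
  rw [hhead, hz]
  apply List.map_congr_left
  intro i _
  simp only [Function.comp]
  apply List.map_congr_left
  intro z hzm
  rw [hget z hzm, PySem.List.pyGetD_natCast, List.getD_eq_getElem?_getD]

lemma pv_foldl_min (L : List (List Int)) (n : Nat) (h : ∀ l ∈ L, l.length = n) :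
    L.foldl (fun mn l => min mn l.length) n = n := by
  induction L with
  | nil => rfl
  | cons c cs ih =>
      simp only [List.foldl_cons, h c List.mem_cons_self, min_self]
      exact ih (fun l hl => h l (List.mem_cons_of_mem _ hl))

lemma pv_col_ne_nil (m : List (String × Int)) (z : String)
    (hz : z ∈ pvZones (pvPairs m)) : pvS (pvPairs m) z ≠ [] := by
  intro h
  rw [pvS, PySem.List.sorted_eq_nil_iff] at h
  rw [pv_mem_zones] at hz
  rcases List.mem_map.mp hz with ⟨p, hp, rfl⟩
  have : p ∈ (pvPairs m).filter (fun q => q.1 == p.1) := List.mem_filter.mpr ⟨hp, by simp⟩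
  rw [pvCol] at h
  have h2 : p.2 ∈ (List.filter (fun q => q.1 == p.1) (pvPairs m)).map Prod.snd :=
    List.mem_map.mpr ⟨p, this, rfl⟩
  rw [h] at h2
  exact List.not_mem_nil h2

-- length of a column = zone multiplicity in m
lemma pv_S_length (m : List (String × Int)) (z : String) :
    (pvS (pvPairs m) z).length = (m.map (fun r => pvZone r.1)).count z := by
  rw [pvS, PySem.List.length_sorted, pvCol, List.length_map, List.count_eq_countP,
    List.countP_map, ← List.countP_eq_length_filter, pvPairs, List.countP_map]
  apply List.countP_congr
  intro p _
  simp

lemma pv_len_eq (m : List (String × Int))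
    (hcnt : ∀ p ∈ m, ∀ q ∈ m,
      (m.map (fun r => pvZone r.1)).count (pvZone p.1)
        = (m.map (fun r => pvZone r.1)).count (pvZone q.1))
    (z z₀ : String) (hzm : z ∈ pvZones (pvPairs m)) (hz₀ : z₀ ∈ pvZones (pvPairs m)) :
    (pvS (pvPairs m) z).length = (pvS (pvPairs m) z₀).length := by
  rw [pv_mem_zones] at hzm hz₀
  have hzm' : z ∈ m.map (fun r => pvZone r.1) := by
    simpa [pvPairs, List.map_map] using hzm
  have hz₀' : z₀ ∈ m.map (fun r => pvZone r.1) := by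
    simpa [pvPairs, List.map_map] using hz₀
  rcases List.mem_map.mp hzm' with ⟨p, hp, rfl⟩
  rcases List.mem_map.mp hz₀' with ⟨q, hq, hq'⟩
  rw [pv_S_length, pv_S_length, ← hq']
  exact hcnt p hp q hq

set_option maxHeartbeats 1000000 in
lemma pv_B_main (m : List (String × Int)) (hne : m ≠ [])
    (hcnt : ∀ p ∈ m, ∀ q ∈ m,
      (m.map (fun r => pvZone r.1)).count (pvZone p.1)
        = (m.map (fun r => pvZone r.1)).count (pvZone q.1)) :
    build_slices_alt m = pvOut m := by
  obtain ⟨z₀, zt, hz⟩ := List.exists_cons_of_ne_nil (pv_zones_ne_nil m hne)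
  unfold build_slices_alt
  simp only []
  rw [PySem.List.foldl_append_singleton_eq_map, List.nil_append]
  have hpairs : m.map (fun p => (pvZone p.1, p.2)) = pvPairs m := rfl
  rw [hpairs, pv_sorted2_eq_flat, pvFlat]
  have hpw : (pvZones (pvPairs m)).Pairwise (· < ·) := by
    rw [pvZones]; exact PySem.List.sorted_ofList_pairwise_lt _
  rw [pv_groupCols_flatMap (pvZones (pvPairs m)) (fun z => pvS (pvPairs m) z) hpw
    (fun z hzm => pv_col_ne_nil m z hzm)]
  -- all columns have the same length
  have hlen : ∀ z ∈ pvZones (pvPairs m), (pvS (pvPairs m) z).length = (pvS (pvPairs m) z₀).length :=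
    fun z hzm => pv_len_eq m hcnt z z₀ hzm (by rw [hz]; exact List.mem_cons_self)
  rw [hz] at hlen ⊢
  simp only [List.map_cons]
  rw [pvZipStar]
  rw [pv_foldl_min ((zt.map (fun z => pvS (pvPairs m) z))) _ (by
    intro l hl
    rcases List.mem_map.mp hl with ⟨z, hzm, rfl⟩
    exact hlen z (List.mem_cons_of_mem _ hzm))]
  rw [pvOut]
  have hhead : (pvZones (pvPairs m)).headI = z₀ := by rw [hz]; rfl
  rw [hhead, hz]
  apply List.map_congr_left
  intro i _
  simp [List.map_map]

theorem build_slices_spec : Claim_equal_build_slices := by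
  intro m _ hpre
  rcases hpre with ⟨_, hne, _, hcnt⟩
  show build_slices m = build_slices_alt m
  rw [pv_A_main m hne, pv_B_main m hne hcnt]
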